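-- pv_equiv track=rewrite | github.com/uzi-belfayez/Protocol_and_acquisition_of_eeg_musical_signals | track_segment_dump.py | collect_track_markers
-- ===== SOURCE A (Python) =====
-- def collect_track_markers(events, event_id):
--     code_to_label = {code: label for label, code in event_id.items()}
--     starts = {}
--     ends = {}
--     for sample, _, code in events:
--         label = code_to_label.get(code, "")
--         if not label.isdigit():
--             continue
--         value = int(label)
--         if 34000 <= value < 35000:
--             key = value % 1000
--             starts.setdefault(key, []).append(sample)
--         elif 35000 <= value < 36000:
--             key = value % 1000
--             ends.setdefault(key, []).append(sample)
--     for key in starts: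
--         starts[key].sort()
--     for key in ends:
--         ends[key].sort()
--     return starts, ends
-- ===== SOURCE B (Python) =====
-- def _insort(lst, x):
--     """Insert x into the sorted list lst, keeping it sorted (binary search)."""
--     lo, hi = 0, len(lst)
--     while lo < hi:
--         mid = (lo + hi) // 2
--         if x < lst[mid]:
--             hi = mid
--         else:
--             lo = mid + 1
--     lst.insert(lo, x)
--
--
-- def collect_track_markers(events, event_id):
--     code_to_label = {code: label for label, code in event_id.items()}
--     starts = {}
--     ends = {}
--     for sample, _, code in events:
--         label = code_to_label.get(code, "")
--         if not label.isdigit():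
--             continue
--         value = int(label)
--         if 34000 <= value < 35000:
--             _insort(starts.setdefault(value % 1000, []), sample)
--         elif 35000 <= value < 36000:
--             _insort(ends.setdefault(value % 1000, []), sample)
--     return starts, ends
-- ===== Notes on version B (the rewrite author's own statement) =====
-- stated objective: alternative
-- what changed: Instead of appending samples per key and then sorting every per-key list in trailing loops, B keeps each per-key list sorted as it goes, placing every sample by binary insertion during the single grouping pass, so the trailing sort loops disappear.
import Mathlib
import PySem

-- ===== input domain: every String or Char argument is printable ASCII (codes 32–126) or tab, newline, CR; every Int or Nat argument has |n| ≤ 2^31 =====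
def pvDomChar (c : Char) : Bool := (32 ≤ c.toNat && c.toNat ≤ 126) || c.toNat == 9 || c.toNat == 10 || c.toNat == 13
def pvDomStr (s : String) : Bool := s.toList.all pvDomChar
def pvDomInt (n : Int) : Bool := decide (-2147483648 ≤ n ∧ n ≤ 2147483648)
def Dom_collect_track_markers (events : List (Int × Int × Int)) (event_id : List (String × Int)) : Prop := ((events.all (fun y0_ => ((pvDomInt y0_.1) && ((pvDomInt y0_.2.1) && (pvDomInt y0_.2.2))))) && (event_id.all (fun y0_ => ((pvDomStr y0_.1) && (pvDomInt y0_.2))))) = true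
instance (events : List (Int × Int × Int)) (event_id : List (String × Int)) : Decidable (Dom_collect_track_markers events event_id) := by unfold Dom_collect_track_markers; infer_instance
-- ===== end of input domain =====

-- B keeps each per-key sample list sorted as it is built, placing every sample by binary
-- insertion during the single grouping pass, so the trailing per-key sort loops disappear
-- (objective: alternative; same results).

-- ===== PORT A =====
def collect_track_markers (events : List (Int × Int × Int)) (event_id : List (String × Int)) :
    (List (Int × List Int)) × (List (Int × List Int)) :=
  -- code_to_label = {code: label for label, code in event_id.items()}
  let code_to_label : PySem.Dict Int String :=
    event_id.foldl (fun d p => d.insert p.2 p.1) PySem.Dict.empty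
  -- for sample, _, code in events: …
  let se : PySem.Dict Int (List Int) × PySem.Dict Int (List Int) :=
    events.foldl (fun se ev =>
        let label := code_to_label.getD ev.2.2 ""
        if PySem.Str.strIsdigit label then
          -- int(label); label.isdigit() holds, so the parse cannot fail
          let value := (PySem.Int.ofStr? label).getD 0
          if 34000 ≤ value ∧ value < 35000 then
            -- starts.setdefault(key, []).append(sample)
            (se.1.modify (PySem.Int.mod value 1000) [] (fun l => l ++ [ev.1]), se.2)
          else if 35000 ≤ value ∧ value < 36000 then
            -- ends.setdefault(key, []).append(sample)
            (se.1, se.2.modify (PySem.Int.mod value 1000) [] (fun l => l ++ [ev.1]))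
          else se
        else se)
      (PySem.Dict.empty, PySem.Dict.empty)
  -- for key in starts: starts[key].sort()   (and the same for ends)
  let starts := se.1.keys.foldl (fun d k => d.modify k [] (fun l => PySem.List.sorted l (fun x => x))) se.1
  let ends := se.2.keys.foldl (fun d k => d.modify k [] (fun l => PySem.List.sorted l (fun x => x))) se.2
  (starts.items, ends.items)

-- ===== PORT B =====
-- _insort's while-loop: binary search for the insertion point (lo, hi are list indices, so Nat)
def pvInsortLoop (lst : List Int) (x : Int) (lo hi : Nat) : Nat :=
  if lo < hi then
    -- mid = (lo + hi) // 2; lst[mid]: lo ≤ mid < hi ≤ len(lst), so the index is in range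
    if x < lst.getD ((lo + hi) / 2) 0 then pvInsortLoop lst x lo ((lo + hi) / 2)
    else pvInsortLoop lst x ((lo + hi) / 2 + 1) hi
  else lo
termination_by hi - lo
decreasing_by all_goals omega

-- _insort(lst, x): lst.insert(lo, x) with 0 ≤ lo ≤ len(lst)
def pvInsort (lst : List Int) (x : Int) : List Int :=
  let lo := pvInsortLoop lst x 0 lst.length
  lst.take lo ++ x :: lst.drop lo

def collect_track_markers_alt (events : List (Int × Int × Int)) (event_id : List (String × Int)) :
    (List (Int × List Int)) × (List (Int × List Int)) :=
  let code_to_label : PySem.Dict Int String :=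
    event_id.foldl (fun d p => d.insert p.2 p.1) PySem.Dict.empty
  let se : PySem.Dict Int (List Int) × PySem.Dict Int (List Int) :=
    events.foldl (fun se ev =>
        let label := code_to_label.getD ev.2.2 ""
        if PySem.Str.strIsdigit label then
          let value := (PySem.Int.ofStr? label).getD 0
          if 34000 ≤ value ∧ value < 35000 then
            -- _insort(starts.setdefault(key, []), sample)
            (se.1.modify (PySem.Int.mod value 1000) [] (fun l => pvInsort l ev.1), se.2)
          else if 35000 ≤ value ∧ value < 36000 then
            -- _insort(ends.setdefault(key, []), sample)
            (se.1, se.2.modify (PySem.Int.mod value 1000) [] (fun l => pvInsort l ev.1))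
          else se
        else se)
      (PySem.Dict.empty, PySem.Dict.empty)
  (se.1.items, se.2.items)

-- ===== PRECONDITION & SPEC =====
def Spec_collect_track_markers (events : List (Int × Int × Int)) (event_id : List (String × Int)) (out : (List (Int × List Int)) × (List (Int × List Int))) : Prop := out = collect_track_markers_alt events event_id
instance (events : List (Int × Int × Int)) (event_id : List (String × Int)) (out : (List (Int × List Int)) × (List (Int × List Int))) : Decidable (Spec_collect_track_markers events event_id out) := by unfold Spec_collect_track_markers; infer_instance

-- ===== CLAIM =====
def Claim_equal_collect_track_markers : Prop := ∀ (events : List (Int × Int × Int)) (event_id : List (String × Int)), Dom_collect_track_markers events event_id → Spec_collect_track_markers events event_id (collect_track_markers events event_id)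

-- ===== LEMMAS AND PROOFS =====

-- label/range decoding shared by both loop bodies: none, or (false, key) start / (true, key) end
def pvBucket (c2l : PySem.Dict Int String) (code : Int) : Option (Bool × Int) :=
  let label := c2l.getD code ""
  if PySem.Str.strIsdigit label then
    let value := (PySem.Int.ofStr? label).getD 0
    if 34000 ≤ value ∧ value < 35000 then some (false, PySem.Int.mod value 1000)
    else if 35000 ≤ value ∧ value < 36000 then some (true, PySem.Int.mod value 1000)
    else none
  else none

-- (k, sample) of the events that land in the starts table (b = false) / ends table (b = true)
def pvProj (c2l : PySem.Dict Int String) (b : Bool) (ev : Int × Int × Int) : Option (Int × Int) :=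
  match pvBucket c2l ev.2.2 with
  | some (b', k) => if b' = b then some (k, ev.1) else none
  | none => none

-- A's loop body is a case split on pvBucket
theorem pvBodyA_eq (c2l : PySem.Dict Int String) (se : PySem.Dict Int (List Int) × PySem.Dict Int (List Int)) (ev : Int × Int × Int) :
    (let label := c2l.getD ev.2.2 ""
     if PySem.Str.strIsdigit label then
       let value := (PySem.Int.ofStr? label).getD 0
       if 34000 ≤ value ∧ value < 35000 then
         (se.1.modify (PySem.Int.mod value 1000) [] (fun l => l ++ [ev.1]), se.2)
       else if 35000 ≤ value ∧ value < 36000 then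
         (se.1, se.2.modify (PySem.Int.mod value 1000) [] (fun l => l ++ [ev.1]))
       else se
     else se)
    = match pvBucket c2l ev.2.2 with
      | some (false, k) => (se.1.modify k [] (fun l => l ++ [ev.1]), se.2)
      | some (true, k) => (se.1, se.2.modify k [] (fun l => l ++ [ev.1]))
      | none => se := by
  simp only [pvBucket]
  split_ifs <;> rfl

-- B's loop body likewise
theorem pvBodyB_eq (c2l : PySem.Dict Int String) (se : PySem.Dict Int (List Int) × PySem.Dict Int (List Int)) (ev : Int × Int × Int) :
    (let label := c2l.getD ev.2.2 ""
     if PySem.Str.strIsdigit label then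
       let value := (PySem.Int.ofStr? label).getD 0
       if 34000 ≤ value ∧ value < 35000 then
         (se.1.modify (PySem.Int.mod value 1000) [] (fun l => pvInsort l ev.1), se.2)
       else if 35000 ≤ value ∧ value < 36000 then
         (se.1, se.2.modify (PySem.Int.mod value 1000) [] (fun l => pvInsort l ev.1))
       else se
     else se)
    = match pvBucket c2l ev.2.2 with
      | some (false, k) => (se.1.modify k [] (fun l => pvInsort l ev.1), se.2)
      | some (true, k) => (se.1, se.2.modify k [] (fun l => pvInsort l ev.1))
      | none => se := by
  simp only [pvBucket]
  split_ifs <;> rfl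

-- a pair fold whose step cases on pvBucket splits into two independent folds over pvProj-filtered lists
theorem pvFoldl_match_split (c2l : PySem.Dict Int String)
    (f g : PySem.Dict Int (List Int) → (Int × Int) → PySem.Dict Int (List Int))
    (evs : List (Int × Int × Int)) (s e : PySem.Dict Int (List Int)) :
    evs.foldl (fun se ev =>
        match pvBucket c2l ev.2.2 with
        | some (false, k) => (f se.1 (k, ev.1), se.2)
        | some (true, k) => (se.1, g se.2 (k, ev.1))
        | none => se) (s, e)
    = ((evs.filterMap (pvProj c2l false)).foldl f s,
       (evs.filterMap (pvProj c2l true)).foldl g e) := by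
  induction evs generalizing s e with
  | nil => rfl
  | cons ev t ih =>
      rcases h : pvBucket c2l ev.2.2 with _ | ⟨b, k⟩
      · simp [pvProj, h, ih]
      · cases b <;> simp [pvProj, h, ih]

-- getD through Pairwise: lst is nondecreasing position-wise
theorem pvGetD_mono (lst : List Int) (hs : lst.Pairwise (· ≤ ·)) (i j : Nat)
    (hij : i ≤ j) (hj : j < lst.length) : lst.getD i 0 ≤ lst.getD j 0 := by
  rcases Nat.eq_or_lt_of_le hij with rfl | hlt
  · exact le_refl _
  · rw [List.getD_eq_getElem lst 0 (lt_trans hlt hj), List.getD_eq_getElem lst 0 hj]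
    exact List.pairwise_iff_getElem.mp hs i j _ _ hlt

-- binary-search invariant: the returned position splits lst into (≤ x) and (> x) parts
theorem pvInsortLoop_spec (lst : List Int) (hs : lst.Pairwise (· ≤ ·)) (x : Int) (lo hi : Nat)
    (hhi : hi ≤ lst.length) (hlo : lo ≤ hi)
    (h1 : ∀ i, i < lo → lst.getD i 0 ≤ x)
    (h2 : ∀ i, hi ≤ i → i < lst.length → x < lst.getD i 0) :
    pvInsortLoop lst x lo hi ≤ lst.length ∧
    (∀ i, i < pvInsortLoop lst x lo hi → lst.getD i 0 ≤ x) ∧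
    (∀ i, pvInsortLoop lst x lo hi ≤ i → i < lst.length → x < lst.getD i 0) := by
  by_cases hlh : lo < hi
  · by_cases hx : x < lst.getD ((lo + hi) / 2) 0
    · -- x < lst[mid]: hi := mid
      rw [pvInsortLoop, if_pos hlh, if_pos hx]
      exact pvInsortLoop_spec lst hs x lo ((lo + hi) / 2) (by omega) (by omega) h1
        (fun i hmi hil => lt_of_lt_of_le hx (pvGetD_mono lst hs _ i hmi hil))
    · -- lst[mid] ≤ x: lo := mid + 1
      rw [pvInsortLoop, if_pos hlh, if_neg hx]
      exact pvInsortLoop_spec lst hs x ((lo + hi) / 2 + 1) hi hhi (by omega)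
        (fun i hi1 => le_trans (pvGetD_mono lst hs i _ (by omega) (by omega)) (not_lt.mp hx)) h2
  · rw [pvInsortLoop, if_neg hlh]
    exact ⟨le_trans hlo hhi, h1, fun i hli hil => h2 i (by omega) hil⟩
termination_by hi - lo
decreasing_by all_goals omega

theorem pvInsort_perm (lst : List Int) (x : Int) : (pvInsort lst x).Perm (x :: lst) := by
  unfold pvInsort
  refine (List.perm_middle).trans ?_
  rw [List.take_append_drop]

theorem pvInsort_pairwise (lst : List Int) (hs : lst.Pairwise (· ≤ ·)) (x : Int) :
    (pvInsort lst x).Pairwise (· ≤ ·) := by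
  obtain ⟨hle, hL, hR⟩ := pvInsortLoop_spec lst hs x 0 lst.length (le_refl _) (Nat.zero_le _)
    (fun i hi => absurd hi (Nat.not_lt_zero i)) (fun i h1 h2 => absurd (lt_of_le_of_lt h1 h2) (lt_irrefl _))
  unfold pvInsort
  set lo := pvInsortLoop lst x 0 lst.length with hlo
  have htake : ∀ a ∈ lst.take lo, a ≤ x := by
    intro a ha
    obtain ⟨i, hilen, hai⟩ := List.mem_iff_getElem.mp ha
    have hilo : i < lo := lt_of_lt_of_le hilen (by simp)
    have : lst[i]'(lt_of_lt_of_le hilo hle) = a := by rw [← hai]; exact (List.getElem_take).symm ▸ rfl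
    rw [← this, ← List.getD_eq_getElem lst 0]
    exact hL i hilo
  have hdrop : ∀ b ∈ lst.drop lo, x ≤ b := by
    intro b hb
    obtain ⟨j, hjlen, hbj⟩ := List.mem_iff_getElem.mp hb
    have hj' : lo + j < lst.length := by
      have := hjlen; rw [List.length_drop] at this; omega
    have : lst[lo + j]'hj' = b := by rw [← hbj]; exact (List.getElem_drop).symm ▸ rfl
    rw [← this, ← List.getD_eq_getElem lst 0]
    exact le_of_lt (hR (lo + j) (Nat.le_add_right _ _) hj')
  rw [List.pairwise_append]
  refine ⟨hs.sublist (List.take_sublist _ _), ?_, ?_⟩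
  · rw [List.pairwise_cons]
    exact ⟨hdrop, hs.sublist (List.drop_sublist _ _)⟩
  · intro a ha b hb
    rcases List.mem_cons.mp hb with rfl | hb'
    · exact htake a ha
    · exact le_trans (htake a ha) (hdrop b hb')

theorem pvFoldInsort_pairwise (l : List Int) (acc : List Int) (hacc : acc.Pairwise (· ≤ ·)) :
    (l.foldl pvInsort acc).Pairwise (· ≤ ·) := by
  induction l generalizing acc with
  | nil => exact hacc
  | cons a t ih => exact ih _ (pvInsort_pairwise acc hacc a)

theorem pvFoldInsort_perm (l : List Int) (acc : List Int) :
    (l.foldl pvInsort acc).Perm (acc ++ l) := by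
  induction l generalizing acc with
  | nil => simp
  | cons a t ih =>
      refine (ih (pvInsort acc a)).trans ?_
      exact ((pvInsort_perm acc a).append_right t).trans List.perm_middle.symm

-- the fold of incremental insertion from [] names the sorted order of the list
theorem pvFoldInsort_eq_sorted (l : List Int) :
    l.foldl pvInsort [] = PySem.List.sorted l (fun x => x) := by
  exact (PySem.List.sorted_id_eq_of_perm_of_pairwise _ _
    (by simpa using pvFoldInsort_perm l []) (pvFoldInsort_pairwise l [] (by simp))).symm

-- getD of a modify-loop with an arbitrary per-key update function
theorem pvGetD_foldl_modify (g : List Int → Int → List Int) (ps : List (Int × Int))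
    (d : PySem.Dict Int (List Int)) (k : Int) :
    (ps.foldl (fun d p => d.modify p.1 [] (fun l => g l p.2)) d).getD k []
      = (ps.filter (fun p => p.1 == k)).foldl (fun l p => g l p.2) (d.getD k []) := by
  induction ps generalizing d with
  | nil => rfl
  | cons p t ih =>
      rw [List.foldl_cons, ih]
      by_cases hk : p.1 = k
      · rw [List.filter_cons_of_pos (by simp [hk]), List.foldl_cons,
          PySem.Dict.getD_modify, if_pos hk.symm, hk]
      · rw [List.filter_cons_of_neg (by simp [hk]),
          PySem.Dict.getD_modify, if_neg (fun h => hk h.symm)]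

-- Set.update with elements already present is the identity
theorem pvSet_update_of_subset (s : PySem.Set Int) (l : List Int) (h : ∀ x ∈ l, x ∈ s) :
    PySem.Set.update s l = s := by
  induction l generalizing s with
  | nil => rfl
  | cons x t ih =>
      have ha : PySem.Set.add s x = s := by
        simp [PySem.Set.add, PySem.Set.contains, h x (by simp)]
      simp only [PySem.Set.update, List.foldl_cons] at ih ⊢
      rw [ha, ih _ (fun y hy => h y (by simp [hy]))]

-- per-key value of A's sort loop, over Nodup keys
theorem pvSortFold_getD (ks : List Int) (hnd : ks.Nodup) (d : PySem.Dict Int (List Int)) (k : Int) :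
    (ks.foldl (fun d k => d.modify k [] (fun l => PySem.List.sorted l (fun x => x))) d).getD k []
      = if k ∈ ks then PySem.List.sorted (d.getD k []) (fun x => x) else d.getD k [] := by
  induction ks generalizing d with
  | nil => simp
  | cons a t ih =>
      rcases List.nodup_cons.mp hnd with ⟨ha, ht⟩
      rw [List.foldl_cons, ih ht]
      by_cases hk : k ∈ t
      · have hne : k ≠ a := fun h => ha (h ▸ hk)
        rw [if_pos hk, if_pos (by simp [hk]), PySem.Dict.getD_modify, if_neg hne]
      · rw [if_neg hk, PySem.Dict.getD_modify]
        by_cases hka : k = a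
        · rw [if_pos hka, if_pos (by simp [hka]), hka]
        · rw [if_neg hka, if_neg (by simp [hka, hk])]

-- the core per-dict fact: group-then-sort-each-list = group-with-incremental-sorted-insertion
theorem pvDict_main (ps : List (Int × Int)) :
    (let A0 : PySem.Dict Int (List Int) := ps.foldl (fun d p => d.modify p.1 [] (fun l => l ++ [p.2])) PySem.Dict.empty
     (A0.keys.foldl (fun d k => d.modify k [] (fun l => PySem.List.sorted l (fun x => x))) A0).items)
    = (ps.foldl (fun d p => d.modify p.1 [] (fun l => pvInsort l p.2)) PySem.Dict.empty).items := by
  have hupd : ∀ l : List Int, PySem.Set.update ([] : PySem.Set Int) l = PySem.Set.ofList l := fun _ => rfl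
  set A0 : PySem.Dict Int (List Int) :=
    ps.foldl (fun d p => d.modify p.1 [] (fun l => l ++ [p.2])) PySem.Dict.empty with hA0
  set S : PySem.Set Int := PySem.Set.ofList (ps.map Prod.fst) with hS
  have hndS : S.Nodup := PySem.Set.nodup_ofList _
  have hA0keys : A0.keys = S := by
    rw [hA0, PySem.Dict.keys_foldl_modify_key ps Prod.fst [] (fun _ p => fun l => l ++ [p.2]),
      PySem.Dict.keys_empty, hupd]
  have hA0getD : ∀ k, A0.getD k [] = ((ps.filter (fun p => p.1 == k)).map (fun x => x.2)) := by
    intro k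
    rw [hA0, PySem.Dict.getD_foldl_modify_append, PySem.Dict.getD_empty, List.nil_append]
  set Af : PySem.Dict Int (List Int) :=
    A0.keys.foldl (fun d k => d.modify k [] (fun l => PySem.List.sorted l (fun x => x))) A0 with hAf
  have hAfkeys : Af.keys = S := by
    rw [hAf, PySem.Dict.keys_foldl_modify_key A0.keys (fun k => k) [] (fun _ _ => fun l => PySem.List.sorted l (fun x => x)),
      (by simp : List.map (fun k : Int => k) A0.keys = A0.keys), pvSet_update_of_subset _ _ (fun x hx => hx), hA0keys]
  have hAfgetD : ∀ k ∈ S, Af.getD k []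
      = PySem.List.sorted ((ps.filter (fun p => p.1 == k)).map (fun x => x.2)) (fun x => x) := by
    intro k hk
    rw [hAf, pvSortFold_getD A0.keys (hA0keys ▸ hndS) A0 k, if_pos (hA0keys ▸ hk), hA0getD]
  set Bf : PySem.Dict Int (List Int) :=
    ps.foldl (fun d p => d.modify p.1 [] (fun l => pvInsort l p.2)) PySem.Dict.empty with hBf
  have hBfkeys : Bf.keys = S := by
    rw [hBf, PySem.Dict.keys_foldl_modify_key ps Prod.fst [] (fun _ p => fun l => pvInsort l p.2),
      PySem.Dict.keys_empty, hupd]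
  have hBfgetD : ∀ k, Bf.getD k []
      = PySem.List.sorted ((ps.filter (fun p => p.1 == k)).map (fun x => x.2)) (fun x => x) := by
    intro k
    rw [hBf, pvGetD_foldl_modify pvInsort ps PySem.Dict.empty k, PySem.Dict.getD_empty,
      show ∀ qs : List (Int × Int), qs.foldl (fun l p => pvInsort l p.2) ([] : List Int)
          = (qs.map (fun x => x.2)).foldl pvInsort [] from fun _ => (List.foldl_map).symm,
      pvFoldInsort_eq_sorted]
  rw [PySem.Dict.items_eq_map_keys Af (hAfkeys ▸ hndS) [],
    PySem.Dict.items_eq_map_keys Bf (hBfkeys ▸ hndS) [], hAfkeys, hBfkeys]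
  exact List.map_congr_left (fun k hk => by rw [hAfgetD k hk, hBfgetD k])

-- ===== VERDICT =====
theorem collect_track_markers_spec : Claim_equal_collect_track_markers := by
  intro events event_id _dom
  unfold Spec_collect_track_markers
  simp only [collect_track_markers, collect_track_markers_alt]
  set c2l := event_id.foldl (fun d p => d.insert p.2 p.1) PySem.Dict.empty with hc2l
  rw [PySem.List.foldl_congr_mem events _
      (fun se ev =>
        match pvBucket c2l ev.2.2 with
        | some (false, k) => (se.1.modify k [] (fun l => l ++ [ev.1]), se.2)
        | some (true, k) => (se.1, se.2.modify k [] (fun l => l ++ [ev.1]))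
        | none => se)
      (PySem.Dict.empty, PySem.Dict.empty) (fun se ev _ => pvBodyA_eq c2l se ev),
    PySem.List.foldl_congr_mem events _
      (fun se ev =>
        match pvBucket c2l ev.2.2 with
        | some (false, k) => (se.1.modify k [] (fun l => pvInsort l ev.1), se.2)
        | some (true, k) => (se.1, se.2.modify k [] (fun l => pvInsort l ev.1))
        | none => se)
      (PySem.Dict.empty, PySem.Dict.empty) (fun se ev _ => pvBodyB_eq c2l se ev),
    pvFoldl_match_split c2l
      (fun d p => d.modify p.1 [] (fun l => l ++ [p.2]))
      (fun d p => d.modify p.1 [] (fun l => l ++ [p.2])) events PySem.Dict.empty PySem.Dict.empty,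
    pvFoldl_match_split c2l
      (fun d p => d.modify p.1 [] (fun l => pvInsort l p.2))
      (fun d p => d.modify p.1 [] (fun l => pvInsort l p.2)) events PySem.Dict.empty PySem.Dict.empty]
  exact Prod.ext
    (pvDict_main (events.filterMap (pvProj c2l false)))
    (pvDict_main (events.filterMap (pvProj c2l true)))
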